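-- pv_equiv track=rewrite | github.com/donglam1824/Project2 | waypoint_gpt_room_priority_obstacle.py | get_preferred_moves
-- ===== SOURCE A (Python) =====
-- def get_preferred_moves(current, goal):
--     """Trả về các hướng di chuyển theo thứ tự ưu tiên dựa trên vị trí mục tiêu"""
--     row_diff = goal[0] - current[0]
--     col_diff = goal[1] - current[1]
--
--     moves = []
--
--     # Ưu tiên di chuyển theo trục có khoảng cách lớn hơn
--     if abs(row_diff) > abs(col_diff):
--         # Ưu tiên di chuyển theo hàng trước
--         if row_diff > 0:
--             moves.append((1, 0))   # Xuống
--         elif row_diff < 0: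
--             moves.append((-1, 0))  # Lên
--
--         if col_diff > 0:
--             moves.append((0, 1))   # Phải
--         elif col_diff < 0:
--             moves.append((0, -1))  # Trái
--     else:
--         # Ưu tiên di chuyển theo cột trước
--         if col_diff > 0:
--             moves.append((0, 1))   # Phải
--         elif col_diff < 0:
--             moves.append((0, -1))  # Trái
--
--         if row_diff > 0:
--             moves.append((1, 0))   # Xuống
--         elif row_diff < 0:
--             moves.append((-1, 0))  # Lên
--
--     # Thêm các hướng còn lại
--     all_directions = [(-1, 0), (1, 0), (0, -1), (0, 1)]
--     for direction in all_directions: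
--         if direction not in moves:
--             moves.append(direction)
--
--     return moves
-- ===== SOURCE B (Python) =====
-- def get_preferred_moves(current, goal):
--     row_diff = goal[0] - current[0]
--     col_diff = goal[1] - current[1]
--     row_primary = abs(row_diff) > abs(col_diff)
--
--     def rank(d):
--         dr, dc = d
--         if dr * row_diff > 0:
--             return 0 if row_primary else 1
--         if dc * col_diff > 0:
--             return 1 if row_primary else 0
--         return 2
--
--     return sorted([(-1, 0), (1, 0), (0, -1), (0, 1)], key=rank)
-- ===== Notes on version B (the rewrite author's own statement) =====
-- stated objective: simpler
-- what changed: Replaces A's two-branch if/elif cascade plus a dedup membership loop by a single stable sort of the fixed direction list under a 3-valued rank key (0 = toward-move on the primary axis, 1 = toward-move on the secondary axis, 2 = rest).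
import Mathlib
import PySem

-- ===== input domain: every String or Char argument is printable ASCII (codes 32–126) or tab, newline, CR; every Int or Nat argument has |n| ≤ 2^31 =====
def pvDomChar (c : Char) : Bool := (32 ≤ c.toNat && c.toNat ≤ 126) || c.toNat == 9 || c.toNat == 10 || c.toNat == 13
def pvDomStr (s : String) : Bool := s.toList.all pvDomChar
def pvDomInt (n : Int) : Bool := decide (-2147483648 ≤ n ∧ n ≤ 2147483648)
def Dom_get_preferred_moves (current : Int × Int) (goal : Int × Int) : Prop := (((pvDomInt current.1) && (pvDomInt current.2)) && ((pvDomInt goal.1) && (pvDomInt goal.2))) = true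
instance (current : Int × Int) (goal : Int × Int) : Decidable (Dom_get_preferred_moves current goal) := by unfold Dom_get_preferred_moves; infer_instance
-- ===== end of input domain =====

-- B replaces A's branch cascade plus membership loop by a single stable sort on a 3-valued rank key (objective: simpler).

-- ===== PORT A =====
def get_preferred_moves (current : Int × Int) (goal : Int × Int) : List (Int × Int) :=
  let row_diff := goal.1 - current.1
  let col_diff := goal.2 - current.2
  let moves : List (Int × Int) := []
  let moves :=
    if |row_diff| > |col_diff| then
      let moves := if row_diff > 0 then moves ++ [(1, 0)]
                   else if row_diff < 0 then moves ++ [(-1, 0)] else moves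
      let moves := if col_diff > 0 then moves ++ [(0, 1)]
                   else if col_diff < 0 then moves ++ [(0, -1)] else moves
      moves
    else
      let moves := if col_diff > 0 then moves ++ [(0, 1)]
                   else if col_diff < 0 then moves ++ [(0, -1)] else moves
      let moves := if row_diff > 0 then moves ++ [(1, 0)]
                   else if row_diff < 0 then moves ++ [(-1, 0)] else moves
      moves
  let all_directions : List (Int × Int) := [(-1, 0), (1, 0), (0, -1), (0, 1)]
  all_directions.foldl (fun moves direction =>
    if direction ∉ moves then moves ++ [direction] else moves) moves

-- ===== PORT B =====
def pvRank (row_diff col_diff : Int) (row_primary : Bool) (d : Int × Int) : Int :=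
  if d.1 * row_diff > 0 then (if row_primary then 0 else 1)
  else if d.2 * col_diff > 0 then (if row_primary then 1 else 0)
  else 2

def get_preferred_moves_alt (current : Int × Int) (goal : Int × Int) : List (Int × Int) :=
  let row_diff := goal.1 - current.1
  let col_diff := goal.2 - current.2
  let row_primary := |row_diff| > |col_diff|
  PySem.List.sorted [(-1, 0), (1, 0), (0, -1), (0, 1)] (pvRank row_diff col_diff row_primary) false

-- ===== PRECONDITION & SPEC =====
def Spec_get_preferred_moves (current : Int × Int) (goal : Int × Int) (out : List (Int × Int)) : Prop := out = get_preferred_moves_alt current goal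
instance (current : Int × Int) (goal : Int × Int) (out : List (Int × Int)) : Decidable (Spec_get_preferred_moves current goal out) := by unfold Spec_get_preferred_moves; infer_instance

-- ===== CLAIM (what is proved, stated in full; the proofs are below) =====
def Claim_equal_get_preferred_moves : Prop := ∀ (current : Int × Int) (goal : Int × Int), Dom_get_preferred_moves current goal → Spec_get_preferred_moves current goal (get_preferred_moves current goal)

-- ===== LEMMAS AND PROOFS =====

-- ===== VERDICT (by name: the statement is the Claim_ definition above) =====
set_option maxHeartbeats 2000000 in
theorem get_preferred_moves_spec : Claim_equal_get_preferred_moves := by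
  intro c g _
  unfold Spec_get_preferred_moves get_preferred_moves get_preferred_moves_alt
  by_cases h3 : |g.2 - c.2| < |g.1 - c.1| <;>
    simp only [h3, gt_iff_lt, if_true, if_false, decide_true, decide_false] <;>
      rcases lt_trichotomy (g.1 - c.1) 0 with h1 | h1 | h1 <;>
        rcases lt_trichotomy (g.2 - c.2) 0 with h2 | h2 | h2
  all_goals first
    | have e1 : (0 < g.1 - c.1) = True := eq_true (by omega)
    | have e1 : (0 < g.1 - c.1) = False := eq_false (by omega)
  all_goals first
    | have e2 : (g.1 - c.1 < 0) = True := eq_true (by omega)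
    | have e2 : (g.1 - c.1 < 0) = False := eq_false (by omega)
  all_goals first
    | have e3 : (0 < g.2 - c.2) = True := eq_true (by omega)
    | have e3 : (0 < g.2 - c.2) = False := eq_false (by omega)
  all_goals first
    | have e4 : (g.2 - c.2 < 0) = True := eq_true (by omega)
    | have e4 : (g.2 - c.2 < 0) = False := eq_false (by omega)
  all_goals first
    | have e5 : (c.1 < g.1) = True := eq_true (by omega)
    | have e5 : (c.1 < g.1) = False := eq_false (by omega)
  all_goals first
    | have e6 : (g.1 < c.1) = True := eq_true (by omega)
    | have e6 : (g.1 < c.1) = False := eq_false (by omega)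
  all_goals first
    | have e7 : (c.2 < g.2) = True := eq_true (by omega)
    | have e7 : (c.2 < g.2) = False := eq_false (by omega)
  all_goals first
    | have e8 : (g.2 < c.2) = True := eq_true (by omega)
    | have e8 : (g.2 < c.2) = False := eq_false (by omega)
  all_goals simp [pvRank, PySem.List.sorted, PySem.List.insertBy, e1, e2, e3, e4, e5, e6, e7, e8]
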